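-- pv_equiv track=rewrite | github.com/chuanbei2026/pacman-gym | src/pacman_gym/game.py | parse_maze
-- ===== SOURCE A (Python) =====
-- WALL = 0
--
-- DOT = 1       # small dot (10 pts)
--
-- POWER = 2     # big dot / power pellet (50 pts)
--
-- EMPTY = 3     # empty path
--
-- GHOST_HOUSE = 4
--
-- def parse_maze(template: list[str]) -> tuple[list[list[int]], list[tuple[int, int]], tuple[int, int]]:
--     """Parse the maze template into a grid, ghost positions, and pacman start."""
--     rows = len(template)
--     cols = max(len(row) for row in template)
--
--     grid = []
--     ghost_positions = []
--     pacman_start = (16, 10)  # default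
--
--     for r, row_str in enumerate(template):
--         row = []
--         for c in range(cols):
--             if c < len(row_str):
--                 ch = row_str[c]
--             else:
--                 ch = 'W'
--
--             if ch == 'W':
--                 row.append(WALL)
--             elif ch == '.':
--                 row.append(DOT)
--             elif ch == 'O':
--                 row.append(POWER)
--             elif ch == '_':
--                 row.append(EMPTY)
--             elif ch == 'G':
--                 ghost_positions.append((r, c))
--                 row.append(GHOST_HOUSE)
--             elif ch == 'P':
--                 pacman_start = (r, c)
--                 row.append(EMPTY)
--             else:
--                 row.append(WALL)
--         grid.append(row)
--
--     return grid, ghost_positions, pacman_start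
-- ===== SOURCE B (Python) =====
-- WALL = 0
-- DOT = 1
-- POWER = 2
-- EMPTY = 3
-- GHOST_HOUSE = 4
--
-- CHAR_MAP = {'W': WALL, '.': DOT, 'O': POWER, '_': EMPTY, 'G': GHOST_HOUSE, 'P': EMPTY}
--
-- def parse_maze(template: list[str]) -> tuple[list[list[int]], list[tuple[int, int]], tuple[int, int]]:
--     """Parse the maze template: three separate passes (grid, ghosts, pacman)."""
--     cols = max(len(row) for row in template)
--     grid = [[CHAR_MAP.get(ch, WALL) for ch in row.ljust(cols, 'W')] for row in template]
--     ghost_positions = [(r, c)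
--                        for r, row in enumerate(template)
--                        for c, ch in enumerate(row)
--                        if ch == 'G']
--     pacman_start = (16, 10)
--     for r, row in enumerate(template):
--         for c, ch in enumerate(row):
--             if ch == 'P':
--                 pacman_start = (r, c)
--     return grid, ghost_positions, pacman_start
-- ===== Notes on version B (the rewrite author's own statement) =====
-- stated objective: simpler
-- what changed: Replaces A's single fused loop with mutable side-state by three independent passes: a char->int map with row padding builds the grid, a flat comprehension collects ghost positions, and a last-occurrence scan finds the pacman start.
import Mathlib
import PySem

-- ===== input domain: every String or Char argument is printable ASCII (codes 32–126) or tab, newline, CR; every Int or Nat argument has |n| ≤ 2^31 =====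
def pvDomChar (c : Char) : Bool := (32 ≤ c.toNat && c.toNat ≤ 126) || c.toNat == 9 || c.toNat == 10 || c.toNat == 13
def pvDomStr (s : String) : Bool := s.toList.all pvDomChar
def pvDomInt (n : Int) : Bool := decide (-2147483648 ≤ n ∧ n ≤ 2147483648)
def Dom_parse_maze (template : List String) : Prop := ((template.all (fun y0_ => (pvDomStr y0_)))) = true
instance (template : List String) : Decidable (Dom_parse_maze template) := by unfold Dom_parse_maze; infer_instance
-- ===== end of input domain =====

-- B replaces A's single fused loop (grid cells, ghost list and pacman start updated side by side)
-- with three independent passes — objective: simpler. Return value only; neither mutates its argument.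

-- ===== PORT A =====
-- inner-loop body of A: one character cell, threading (row, ghost_positions, pacman_start)
def pvStepA (r : Int) (s : List Char) (st2 : List Int × List (Int × Int) × (Int × Int)) (c : Nat) :
    List Int × List (Int × Int) × (Int × Int) :=
  let ch := if h : c < s.length then s[c] else 'W'
  if ch = 'W' then (st2.1 ++ [0], st2.2.1, st2.2.2)
  else if ch = '.' then (st2.1 ++ [1], st2.2.1, st2.2.2)
  else if ch = 'O' then (st2.1 ++ [2], st2.2.1, st2.2.2)
  else if ch = '_' then (st2.1 ++ [3], st2.2.1, st2.2.2)
  else if ch = 'G' then (st2.1 ++ [4], st2.2.1 ++ [(r, (c : Int))], st2.2.2)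
  else if ch = 'P' then (st2.1 ++ [3], st2.2.1, (r, (c : Int)))
  else (st2.1 ++ [0], st2.2.1, st2.2.2)

-- outer-loop body of A: one template row, threading (grid, ghost_positions, pacman_start)
def pvOutStepA (cols : Nat) (st : List (List Int) × List (Int × Int) × (Int × Int)) (rp : Int × String) :
    List (List Int) × List (Int × Int) × (Int × Int) :=
  let inner := (List.range cols).foldl (pvStepA rp.1 rp.2.toList) ([], st.2.1, st.2.2)
  (st.1 ++ [inner.1], inner.2.1, inner.2.2)

def parse_maze (template : List String) : List (List Int) × (List (Int × Int)) × (Int × Int) :=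
  -- rows = len(template) is computed by A but never used
  let cols := (template.map (fun s => s.toList.length)).foldl max 0
  (PySem.List.enumerate template).foldl (pvOutStepA cols) ([], [], ((16 : Int), (10 : Int)))

-- ===== PORT B =====
def pvCharMap : PySem.Dict Char Int :=
  PySem.Dict.ofList [('W', 0), ('.', 1), ('O', 2), ('_', 3), ('G', 4), ('P', 3)]

-- hand port of row.ljust(cols, 'W'): exact (pads on the right with 'W' up to length cols)
def pvLjustW (s : List Char) (w : Nat) : List Char := s ++ List.replicate (w - s.length) 'W'

def parse_maze_alt (template : List String) : List (List Int) × (List (Int × Int)) × (Int × Int) :=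
  let cols := (template.map (fun s => s.toList.length)).foldl max 0
  let grid := template.map (fun row => (pvLjustW row.toList cols).map (fun ch => pvCharMap.getD ch 0))
  let ghosts := (PySem.List.enumerate template).flatMap (fun rp =>
    (PySem.List.enumerate rp.2.toList).filterMap (fun cp =>
      if cp.2 = 'G' then some (rp.1, cp.1) else none))
  let pac := (PySem.List.enumerate template).foldl (fun p rp =>
    (PySem.List.enumerate rp.2.toList).foldl (fun p cp =>
      if cp.2 = 'P' then (rp.1, cp.1) else p) p) ((16 : Int), (10 : Int))
  (grid, ghosts, pac)

-- ===== PRECONDITION & SPEC =====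
-- Pre_ excludes only the empty template, on which A raises ValueError (max() of an empty sequence).
def Pre_parse_maze (template : List String) : Prop := template ≠ []
instance (template : List String) : Decidable (Pre_parse_maze template) := by unfold Pre_parse_maze; infer_instance
def pvWitness_parse_maze : List String := ["W.O", "G_P"]

def Spec_parse_maze (template : List String) (out : List (List Int) × (List (Int × Int)) × (Int × Int)) : Prop := out = parse_maze_alt template
instance (template : List String) (out : List (List Int) × (List (Int × Int)) × (Int × Int)) : Decidable (Spec_parse_maze template out) := by unfold Spec_parse_maze; infer_instance

-- ===== CLAIM (what is proved, stated in full; the proofs are below) =====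
def Claim_equal_parse_maze : Prop := ∀ (template : List String), Dom_parse_maze template → Pre_parse_maze template → Spec_parse_maze template (parse_maze template)

-- ===== LEMMAS AND PROOFS =====

-- abstract per-cell functions used to characterise A's fused loop
def pvPadGet (s : List Char) (c : Nat) : Char := s.getD c 'W'
def pvCell (ch : Char) : Int :=
  if ch = 'W' then 0 else if ch = '.' then 1 else if ch = 'O' then 2
  else if ch = '_' then 3 else if ch = 'G' then 4 else if ch = 'P' then 3 else 0
def pvGh (r : Int) (s : List Char) (c : Nat) : Option (Int × Int) :=
  if pvPadGet s c = 'G' then some (r, (c : Int)) else none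
def pvPacStep (r : Int) (s : List Char) (p : Int × Int) (c : Nat) : Int × Int :=
  if pvPadGet s c = 'P' then (r, (c : Int)) else p

lemma pvStepA_eq (r : Int) (s : List Char) (st2 : List Int × List (Int × Int) × (Int × Int)) (c : Nat) :
    pvStepA r s st2 c =
      (st2.1 ++ [pvCell (pvPadGet s c)],
       st2.2.1 ++ (pvGh r s c).toList,
       pvPacStep r s st2.2.2 c) := by
  have hget : (if h : c < s.length then s[c] else 'W') = pvPadGet s c := by
    unfold pvPadGet
    rcases Nat.lt_or_ge c s.length with h | h
    · simp [h, List.getD_eq_getElem?_getD]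
    · simp [Nat.not_lt.mpr h, List.getD_eq_getElem?_getD]
  unfold pvStepA pvCell pvGh pvPacStep
  rw [hget]
  simp only []
  split_ifs <;> simp_all

lemma pvInnerA_spec (r : Int) (s : List Char) :
    ∀ (n : Nat) (row0 : List Int) (gh : List (Int × Int)) (pac : Int × Int),
    (List.range n).foldl (pvStepA r s) (row0, gh, pac) =
      (row0 ++ (List.range n).map (fun c => pvCell (pvPadGet s c)),
       gh ++ (List.range n).filterMap (pvGh r s),
       (List.range n).foldl (pvPacStep r s) pac) := by
  intro n
  induction n with
  | zero => simp
  | succ n ih =>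
    intro row0 gh pac
    simp only [List.range_succ, List.foldl_append, ih, pvStepA_eq, List.filterMap_append,
      List.map_append, List.foldl_cons, List.foldl_nil, List.map_cons, List.map_nil]
    cases h : pvGh r s n <;> simp [h]

lemma pvOuterA_spec (cols : Nat) :
    ∀ (ts : List String) (k : Int) (grid : List (List Int)) (gh : List (Int × Int)) (pac : Int × Int),
    (PySem.List.enumerate ts k).foldl (pvOutStepA cols) (grid, gh, pac) =
      (grid ++ ts.map (fun str => (List.range cols).map (fun c => pvCell (pvPadGet str.toList c))),
       gh ++ (PySem.List.enumerate ts k).flatMap (fun rp => (List.range cols).filterMap (pvGh rp.1 rp.2.toList)),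
       (PySem.List.enumerate ts k).foldl (fun p rp => (List.range cols).foldl (pvPacStep rp.1 rp.2.toList) p) pac) := by
  intro ts
  induction ts with
  | nil => intro k grid gh pac; simp [PySem.List.enumerate]
  | cons x xs ih =>
    intro k grid gh pac
    rw [PySem.List.enumerate_cons, List.foldl_cons]
    have hstep : pvOutStepA cols (grid, gh, pac) (k, x) =
        (grid ++ [(List.range cols).map (fun c => pvCell (pvPadGet x.toList c))],
         gh ++ (List.range cols).filterMap (pvGh k x.toList),
         (List.range cols).foldl (pvPacStep k x.toList) pac) := by
      unfold pvOutStepA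
      rw [pvInnerA_spec]
      simp
    rw [hstep, ih]
    simp [List.append_assoc]

-- B's dict lookup computes the same cell value as A's if-chain
lemma pvCell_eq_dict (ch : Char) : pvCell ch = pvCharMap.getD ch 0 := by
  have hitems : pvCharMap.items = [('W', 0), ('.', 1), ('O', 2), ('_', 3), ('G', 4), ('P', 3)] := by decide
  unfold pvCell
  simp only [PySem.Dict.getD, PySem.Dict.get?, hitems]
  split_ifs with h1 h2 h3 h4 h5 h6
  · subst h1; decide
  · subst h2; decide
  · subst h3; decide
  · subst h4; decide
  · subst h5; decide
  · subst h6; decide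
  · have e1 : ('W' == ch) = false := beq_eq_false_iff_ne.mpr (Ne.symm h1)
    have e2 : ('.' == ch) = false := beq_eq_false_iff_ne.mpr (Ne.symm h2)
    have e3 : ('O' == ch) = false := beq_eq_false_iff_ne.mpr (Ne.symm h3)
    have e4 : ('_' == ch) = false := beq_eq_false_iff_ne.mpr (Ne.symm h4)
    have e5 : ('G' == ch) = false := beq_eq_false_iff_ne.mpr (Ne.symm h5)
    have e6 : ('P' == ch) = false := beq_eq_false_iff_ne.mpr (Ne.symm h6)
    simp [List.find?, e1, e2, e3, e4, e5, e6]

-- the padded row is the range-indexed row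
lemma pvLjust_eq_map_range (s : List Char) (cols : Nat) (h : s.length ≤ cols) :
    pvLjustW s cols = (List.range cols).map (pvPadGet s) := by
  apply List.ext_getElem
  · simp [pvLjustW]; omega
  · intro i h1 h2
    simp only [List.getElem_map, List.getElem_range, pvPadGet, pvLjustW]
    rcases Nat.lt_or_ge i s.length with hi | hi
    · rw [List.getElem_append_left hi]
      simp [List.getD_eq_getElem?_getD, List.getElem?_eq_getElem hi]
    · rw [List.getElem_append_right hi]
      simp [List.getD_eq_getElem?_getD, List.getElem?_eq_none (by omega)]

lemma pvRow_conv (s : List Char) (cols : Nat) (h : s.length ≤ cols) :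
    (List.range cols).map (fun c => pvCell (pvPadGet s c)) =
      (pvLjustW s cols).map (fun ch => pvCharMap.getD ch 0) := by
  rw [pvLjust_eq_map_range s cols h, List.map_map]
  exact List.map_congr_left (fun c _ => pvCell_eq_dict _)

-- generic: a filterMap over enumerate is a filterMap over indices
lemma pvEnumFilterMap {β : Type} (F : Int → Char → Option β) :
    ∀ (s : List Char) (k : Int),
    (PySem.List.enumerate s k).filterMap (fun cp => F cp.1 cp.2) =
      (List.range s.length).filterMap (fun (c : Nat) => F (k + c) (s.getD c 'W')) := by
  intro s
  induction s with
  | nil => intro k; simp [PySem.List.enumerate]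
  | cons x xs ih =>
    intro k
    rw [PySem.List.enumerate_cons]
    simp only [List.filterMap_cons, List.length_cons, List.range_succ_eq_map,
      List.filterMap_map, ih (k + 1)]
    have : (fun (c : Nat) => F (k + 1 + (c : Int)) (xs.getD c 'W')) =
        ((fun (c : Nat) => F (k + (c : Int)) ((x :: xs).getD c 'W')) ∘ Nat.succ) := by
      funext c
      simp only [Function.comp, List.getD_cons_succ]
      congr 1
      push_cast; ring
    rw [this]
    cases F (k + 0) x <;> simp [Function.comp]

-- generic: a foldl over enumerate is a foldl over indices
lemma pvEnumFoldl {β : Type} (F : β → Int → Char → β) :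
    ∀ (s : List Char) (k : Int) (init : β),
    (PySem.List.enumerate s k).foldl (fun b cp => F b cp.1 cp.2) init =
      (List.range s.length).foldl (fun b (c : Nat) => F b (k + c) (s.getD c 'W')) init := by
  intro s
  induction s with
  | nil => intro k init; simp [PySem.List.enumerate]
  | cons x xs ih =>
    intro k init
    rw [PySem.List.enumerate_cons]
    simp only [List.foldl_cons, List.length_cons, List.range_succ_eq_map,
      List.foldl_map, ih (k + 1)]
    have : ∀ (b : β) (c : Nat), F b (k + 1 + (c : Int)) (xs.getD c 'W') =
        F b (k + ((Nat.succ c : Nat) : Int)) ((x :: xs).getD (Nat.succ c) 'W') := by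
      intro b c
      simp only [List.getD_cons_succ]
      congr 1
      push_cast; ring
    rw [PySem.List.foldl_congr_mem _ _ (fun b c => F b (k + ((Nat.succ c : Nat) : Int)) ((x :: xs).getD (Nat.succ c) 'W')) _
      (fun b c _ => this b c)]
    congr 1
    simp

lemma pvPadGet_oob (s : List Char) (c : Nat) (h : s.length ≤ c) : pvPadGet s c = 'W' := by
  unfold pvPadGet
  rw [List.getD_eq_getElem?_getD, List.getElem?_eq_none h]
  rfl

-- beyond the row length the padded character is 'W', so ghost/pacman passes may stop at the row length
lemma pvGhost_conv (r : Int) (s : List Char) (cols : Nat) (h : s.length ≤ cols) :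
    (List.range cols).filterMap (pvGh r s) =
      (PySem.List.enumerate s 0).filterMap (fun cp => if cp.2 = 'G' then some (r, cp.1) else none) := by
  rw [pvEnumFilterMap (fun c ch => if ch = 'G' then some (r, c) else none) s 0]
  have hsplit : cols = s.length + (cols - s.length) := by omega
  rw [hsplit, List.range_add, List.filterMap_append, List.filterMap_map]
  have h2 : (List.range (cols - s.length)).filterMap (pvGh r s ∘ (fun j => s.length + j)) = [] := by
    apply List.filterMap_eq_nil_iff.mpr
    intro j hj
    have hw := pvPadGet_oob s (s.length + j) (by omega)
    simp [Function.comp, pvGh, hw]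
  rw [h2, List.append_nil]
  apply List.filterMap_congr
  intro c hc
  simp only [List.mem_range] at hc
  simp [pvGh, pvPadGet]

lemma pvPac_conv (r : Int) (s : List Char) (cols : Nat) (h : s.length ≤ cols) (p : Int × Int) :
    (List.range cols).foldl (pvPacStep r s) p =
      (PySem.List.enumerate s 0).foldl (fun p cp => if cp.2 = 'P' then (r, cp.1) else p) p := by
  rw [pvEnumFoldl (fun b c ch => if ch = 'P' then (r, c) else b) s 0]
  have hsplit : cols = s.length + (cols - s.length) := by omega
  rw [hsplit, List.range_add, List.foldl_append, List.foldl_map]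
  have h2 : ∀ (q : Int × Int) j, j ∈ List.range (cols - s.length) →
      pvPacStep r s q (s.length + j) = q := by
    intro q j hj
    have hw := pvPadGet_oob s (s.length + j) (by omega)
    simp [pvPacStep, hw]
  rw [PySem.List.foldl_congr_mem _ _ (fun q _ => q) _ h2, List.foldl_fixed]
  apply PySem.List.foldl_congr_mem
  intro q c hc
  simp [pvPacStep, pvPadGet]

lemma pvLen_le (template : List String) (s : String) (hs : s ∈ template) :
    s.toList.length ≤ (template.map (fun t => t.toList.length)).foldl max 0 :=
  (PySem.List.le_foldl_max _ 0).2 _ (List.mem_map_of_mem hs)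

lemma pvSnd_mem {rp : Int × String} {template : List String} {k : Int}
    (h : rp ∈ PySem.List.enumerate template k) : rp.2 ∈ template := by
  have := PySem.List.map_snd_enumerate template k
  rw [← this]
  exact List.mem_map_of_mem h

-- ===== VERDICT (by name: the statement is the Claim_ definition above) =====
theorem parse_maze_spec : Claim_equal_parse_maze := by
  intro template _ _
  unfold Spec_parse_maze parse_maze parse_maze_alt
  rw [pvOuterA_spec]
  simp only [List.nil_append]
  refine congrArg₂ _ ?_ (congrArg₂ _ ?_ ?_)
  · exact List.map_congr_left fun s hs =>
      pvRow_conv s.toList _ (pvLen_le template s hs)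
  · exact List.flatMap_congr fun rp hrp =>
      pvGhost_conv rp.1 rp.2.toList _ (pvLen_le template rp.2 (pvSnd_mem hrp))
  · exact PySem.List.foldl_congr_mem _ _ _ _ fun p rp hrp =>
      pvPac_conv rp.1 rp.2.toList _ (pvLen_le template rp.2 (pvSnd_mem hrp)) p
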